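-- pv_equiv track=rewrite | github.com/nickchen111/Leetcode | Binary_Search/3824. Minimum K to Reduce Array Within Limit.py | minimumK
-- ===== SOURCE A (Python) =====
-- from typing import List
--
-- def minimumK(nums: List[int]) -> int:
--     left = 1
--     right = 2 * 10 ** 5
--     def check(mid:int) -> bool:
--         ans = 0
--         for x in nums:
--             if x > 0:
--                 ans += (x + mid - 1) // mid
--         return ans <= mid * mid
--     while left < right:
--         mid = left + (right - left) // 2
--         if check(mid):
--             right = mid
--         else:
--             left = mid + 1
--     return left
-- ===== SOURCE B (Python) =====
-- def minimumK(nums):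
--     LIMIT = 2 * 10 ** 5
--     for k in range(1, LIMIT):
--         total = 0
--         for x in nums:
--             if x > 0:
--                 total += (x + k - 1) // k
--         if total <= k * k:
--             return k
--     return LIMIT
-- ===== Notes on version B (the rewrite author's own statement) =====
-- stated objective: simpler
-- what changed: Replaces the binary search over [1, 2*10^5] with a direct linear scan that returns the first k whose ceil-division total is at most k*k (falling through to 2*10^5), relying on the predicate's monotonicity for equality.
import Mathlib
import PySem

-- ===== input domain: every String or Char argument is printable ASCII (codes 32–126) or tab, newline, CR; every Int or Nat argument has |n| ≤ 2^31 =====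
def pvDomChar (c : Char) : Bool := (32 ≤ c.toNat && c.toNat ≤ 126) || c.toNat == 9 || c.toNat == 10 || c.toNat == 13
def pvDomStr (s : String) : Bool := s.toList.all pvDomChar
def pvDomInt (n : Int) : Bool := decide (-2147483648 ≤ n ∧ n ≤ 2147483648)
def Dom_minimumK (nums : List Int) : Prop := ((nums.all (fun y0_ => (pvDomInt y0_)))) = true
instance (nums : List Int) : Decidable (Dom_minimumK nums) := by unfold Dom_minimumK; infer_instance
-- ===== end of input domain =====

-- B replaces A's binary search with a plain linear scan for the first k whose
-- ceil-division total is ≤ k*k (simpler; not faster — the scan visits every k up to the answer).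

-- midpoint bounds, cited by minimumKLoop's decreasing_by
theorem pv_mid_bounds (L R : Int) (h : L < R) :
    L ≤ L + PySem.Int.floordiv (R - L) 2 ∧ L + PySem.Int.floordiv (R - L) 2 < R := by
  rw [PySem.Int.floordiv_eq_ediv_of_pos (by norm_num : (0:Int) < 2)]
  omega

-- ===== PORT A =====
-- A's inner helper `check(mid)`: sum of (x + mid - 1)//mid over positive x, compared with mid*mid
def checkA (nums : List Int) (mid : Int) : Bool :=
  decide ((nums.foldl (fun ans x => if x > 0 then ans + PySem.Int.floordiv (x + mid - 1) mid else ans) 0) ≤ mid * mid)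

-- A's `while left < right` binary-search loop
def minimumKLoop (nums : List Int) (left right : Int) : Int :=
  if h : left < right then
    let mid := left + PySem.Int.floordiv (right - left) 2
    if checkA nums mid then minimumKLoop nums left mid
    else minimumKLoop nums (mid + 1) right
  else left
termination_by (right - left).toNat
decreasing_by
  · have := pv_mid_bounds left right h; omega
  · have := pv_mid_bounds left right h; omega

def minimumK (nums : List Int) : Int := minimumKLoop nums 1 (2 * 10 ^ 5)

-- ===== PORT B =====
-- B's per-k total/test (same body as A's check; B recomputes it inside its scan)
def checkB (nums : List Int) (k : Int) : Bool :=
  decide ((nums.foldl (fun total x => if x > 0 then total + PySem.Int.floordiv (x + k - 1) k else total) 0) ≤ k * k)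

-- B's `for k in range(1, 2*10**5)` scan with early return, fall-through 2*10^5
def minimumKScan (nums : List Int) (k : Int) : Int :=
  if h : k < 2 * 10 ^ 5 then
    if checkB nums k then k else minimumKScan nums (k + 1)
  else 2 * 10 ^ 5
termination_by (2 * 10 ^ 5 - k).toNat

def minimumK_alt (nums : List Int) : Int := minimumKScan nums 1

-- ===== PRECONDITION & SPEC =====
def Spec_minimumK (nums : List Int) (out : Int) : Prop := out = minimumK_alt nums
instance (nums : List Int) (out : Int) : Decidable (Spec_minimumK nums out) := by unfold Spec_minimumK; infer_instance

-- ===== CLAIM (what is proved, stated in full; the proofs are below) =====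
def Claim_equal_minimumK : Prop := ∀ (nums : List Int), Dom_minimumK nums → Spec_minimumK nums (minimumK nums)

-- ===== LEMMAS AND PROOFS =====

theorem checkA_eq_checkB : checkA = checkB := rfl

-- ceil division (x + k - 1) // k is antitone in the divisor for x > 0
theorem pv_cd_antitone (x k k' : Int) (hx : 0 < x) (hk : 0 < k) (hkk : k ≤ k') :
    PySem.Int.floordiv (x + k' - 1) k' ≤ PySem.Int.floordiv (x + k - 1) k := by
  have hk' : 0 < k' := lt_of_lt_of_le hk hkk
  set q := PySem.Int.floordiv (x + k' - 1) k' with hq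
  have h1 : q * k' ≤ x + k' - 1 :=
    (PySem.Int.le_floordiv_iff_mul_le hk').mp le_rfl
  have h2 : 1 ≤ q := by
    rw [hq, PySem.Int.le_floordiv_iff_mul_le hk']
    omega
  rw [PySem.Int.le_floordiv_iff_mul_le hk]
  nlinarith
-- the fold accumulating the ceil-division total is monotone in accumulator and antitone in k
theorem pv_fold_le (nums : List Int) (k k' : Int) (hk : 0 < k) (hkk : k ≤ k') :
    ∀ (a a' : Int), a ≤ a' →
      nums.foldl (fun t x => if x > 0 then t + PySem.Int.floordiv (x + k' - 1) k' else t) a ≤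
      nums.foldl (fun t x => if x > 0 then t + PySem.Int.floordiv (x + k - 1) k else t) a' := by
  induction nums with
  | nil => intro a a' h; simpa using h
  | cons x xs ih =>
    intro a a' h
    simp only [List.foldl]
    by_cases hx : x > 0
    · simp only [if_pos hx]
      exact ih _ _ (by have := pv_cd_antitone x k k' hx hk hkk; omega)
    · simp only [if_neg hx]; exact ih _ _ h

theorem pv_check_mono (nums : List Int) (k k' : Int) (hk : 1 ≤ k) (hkk : k ≤ k')
    (h : checkB nums k = true) : checkB nums k' = true := by
  unfold checkB at h ⊢
  rw [decide_eq_true_iff] at h ⊢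
  have h1 := pv_fold_le nums k k' (by omega) hkk 0 0 le_rfl
  nlinarith

-- first k in [a, R) with checkB, else R (proof-only reference function)
def sfind (nums : List Int) (a R : Int) : Int :=
  if h : a < R then
    if checkB nums a then a else sfind nums (a + 1) R
  else R
termination_by (R - a).toNat

theorem sfind_skip (nums : List Int) (a b R : Int) (hab : a ≤ b) (hbR : b ≤ R)
    (hfail : ∀ j, a ≤ j → j < b → checkB nums j = false) :
    sfind nums a R = sfind nums b R := by
  by_cases h : a = b
  · rw [h]
  · have hab' : a < b := lt_of_le_of_ne hab h
    rw [sfind, dif_pos (by omega), if_neg (by simp [hfail a le_rfl hab'])]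
    exact sfind_skip nums (a + 1) b R (by omega) hbR (fun j h1 h2 => hfail j (by omega) h2)
termination_by (b - a).toNat
decreasing_by omega

theorem sfind_cap (nums : List Int) (a m R : Int) (ham : a ≤ m) (hmR : m < R)
    (hchk : checkB nums m = true) :
    sfind nums a R = sfind nums a m := by
  by_cases h : a = m
  · subst h
    rw [sfind, dif_pos (by omega), if_pos hchk, sfind, dif_neg (by omega)]
  · have ham' : a < m := lt_of_le_of_ne ham h
    conv_lhs => rw [sfind]
    conv_rhs => rw [sfind]
    rw [dif_pos (show a < R by omega), dif_pos ham']
    by_cases hca : checkB nums a = true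
    · simp [hca]
    · simp only [hca]
      simp only [Bool.false_eq_true, if_false]
      exact sfind_cap nums (a + 1) m R (by omega) hmR hchk
termination_by (m - a).toNat
decreasing_by omega

theorem loop_eq_sfind (nums : List Int) (L R : Int) (hL : 1 ≤ L) (hLR : L ≤ R) :
    minimumKLoop nums L R = sfind nums L R := by
  by_cases h : L < R
  · have hmid := pv_mid_bounds L R h
    set mid := L + PySem.Int.floordiv (R - L) 2 with hmiddef
    rw [minimumKLoop, dif_pos h]
    by_cases hc : checkA nums mid = true
    · rw [if_pos hc]
      have := loop_eq_sfind nums L mid hL hmid.1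
      rw [this, ← sfind_cap nums L mid R hmid.1 hmid.2 (by rw [← checkA_eq_checkB]; exact hc)]
    · rw [if_neg hc]
      have := loop_eq_sfind nums (mid + 1) R (by omega) (by omega)
      rw [this]
      refine (sfind_skip nums L (mid + 1) R (by omega) (by omega) ?_).symm
      intro j h1 h2
      by_contra hj
      have hj' : checkB nums j = true := by
        cases hb : checkB nums j with
        | true => rfl
        | false => exact absurd hb hj
      have := pv_check_mono nums j mid (by omega) (by omega) hj'
      rw [← checkA_eq_checkB] at this
      exact hc this
  · have hLR' : L = R := by omega
    rw [minimumKLoop, dif_neg h, sfind, dif_neg h, hLR']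
termination_by (R - L).toNat
decreasing_by
  · have := pv_mid_bounds L R h; omega
  · have := pv_mid_bounds L R h; omega

theorem scan_eq_sfind (nums : List Int) (a : Int) :
    minimumKScan nums a = sfind nums a (2 * 10 ^ 5) := by
  by_cases h : a < 2 * 10 ^ 5
  · rw [minimumKScan, dif_pos h, sfind, dif_pos h]
    by_cases hc : checkB nums a = true
    · simp [hc]
    · simp only [hc]
      simp only [Bool.false_eq_true, if_false]
      exact scan_eq_sfind nums (a + 1)
  · rw [minimumKScan, dif_neg h, sfind, dif_neg h]
termination_by (2 * 10 ^ 5 - a).toNat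
decreasing_by omega

-- ===== VERDICT (by name: the statement is the Claim_ definition above) =====
theorem minimumK_spec : Claim_equal_minimumK := by
  intro nums _
  unfold Spec_minimumK minimumK minimumK_alt
  rw [loop_eq_sfind nums 1 (2 * 10 ^ 5) le_rfl (by norm_num), scan_eq_sfind]
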